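-- pv_equiv track=rewrite | github.com/krishnadogney/My-codes | emulator.py | slot_alloc
-- ===== SOURCE A (Python) =====
-- def slot_alloc(num_slots):
--     """this function gives schedule for a frame.This function can be called at the starting of ech frame or same
--     schedule can be used for all the frames.
--     Arguments
--     ----------
--     num_slots : number of slots in a frame
--
--     Returns
--     --------
--     dictionary where key is starting slot number and value is number of slots.
--     """
--     initial = 2
--     prime_num = []
--     slot_slot_len_dict = {}
--     for number in range(initial + 1, num_slots + 1):
--         count = 0
--         for div in range(initial, number):
--             if (number % div) == 0:
--                 count = count + 1
--         if count < 1: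
--             prime_num.append(number)
--     for ind, item in enumerate(prime_num):
--         if ind < len(prime_num) - 1:
--             slot_slot_len_dict[item] = prime_num[ind + 1] - prime_num[ind]
--         elif ind == len(prime_num) - 1:
--             slot_slot_len_dict[item] = num_slots - prime_num[ind]
--     slot_slot_len_dict[1] = 2
--
--     return slot_slot_len_dict
-- ===== SOURCE B (Python) =====
-- def slot_alloc(num_slots):
--     """Sieve of Eratosthenes over [2..num_slots], then one pass of consecutive gaps."""
--     n = num_slots
--     sieve = [True] * (n + 1)
--     for p in range(2, n + 1):
--         if sieve[p]:
--             for m in range(2 * p, n + 1, p):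
--                 sieve[m] = False
--     primes = [p for p in range(3, n + 1) if sieve[p]]
--     result = {}
--     for p, q in zip(primes, primes[1:] + [n]):
--         result[p] = q - p
--     result[1] = 2
--     return result
-- ===== Notes on version B (the rewrite author's own statement) =====
-- stated objective: faster
-- what changed: Replaced per-number trial division (inner scan of all smaller divisors) by a Sieve of Eratosthenes plus a single zip pass for the gaps.
import Mathlib
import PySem

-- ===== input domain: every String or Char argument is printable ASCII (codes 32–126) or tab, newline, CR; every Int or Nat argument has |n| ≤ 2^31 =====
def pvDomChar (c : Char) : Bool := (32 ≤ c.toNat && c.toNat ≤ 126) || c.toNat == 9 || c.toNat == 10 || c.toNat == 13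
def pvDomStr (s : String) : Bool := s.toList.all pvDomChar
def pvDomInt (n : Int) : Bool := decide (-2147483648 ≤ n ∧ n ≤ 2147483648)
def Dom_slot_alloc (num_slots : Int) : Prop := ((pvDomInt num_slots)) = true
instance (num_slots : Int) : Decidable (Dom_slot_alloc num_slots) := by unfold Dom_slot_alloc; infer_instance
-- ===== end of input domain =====

-- B replaces A's per-number trial division by a Sieve of Eratosthenes and a single zip pass for the gaps (objective: faster).

-- ===== PORT A =====
def slot_alloc (num_slots : Int) : List (Int × Int) :=
  let initial : Int := 2
  let prime_num : List Int :=
    (PySem.List.pyRange (initial + 1) (num_slots + 1) 1).foldl (fun acc number =>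
      let count : Int :=
        (PySem.List.pyRange initial number 1).foldl (fun c dv =>
          if PySem.Int.mod number dv = 0 then c + 1 else c) 0
      if count < 1 then acc ++ [number] else acc) []
  let d : PySem.Dict Int Int :=
    (PySem.List.enumerate prime_num).foldl (fun d p =>
      -- prime_num[ind + 1] is in range because of the guard ind < len - 1
      if p.1 < (prime_num.length : Int) - 1 then
        d.insert p.2 (PySem.List.pyGetD prime_num (p.1 + 1) 0 - PySem.List.pyGetD prime_num p.1 0)
      else if p.1 = (prime_num.length : Int) - 1 then
        d.insert p.2 (num_slots - PySem.List.pyGetD prime_num p.1 0)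
      else d) PySem.Dict.empty
  (d.insert 1 2).items

-- ===== PORT B =====
def slot_alloc_alt (num_slots : Int) : List (Int × Int) :=
  -- [True] * (n + 1): a negative multiplier gives [], exactly what Int.toNat's clamp does
  let sieve : List Bool := List.replicate (num_slots + 1).toNat true
  let sieve : List Bool :=
    (PySem.List.pyRange 2 (num_slots + 1) 1).foldl (fun s p =>
      -- sieve[p] and sieve[m] are in range: 2 ≤ p ≤ num_slots and 4 ≤ 2p ≤ m ≤ num_slots < len(sieve)
      if PySem.List.pyGetD s p false then
        (PySem.List.pyRange (2 * p) (num_slots + 1) p).foldl (fun s m => s.set m.toNat false) s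
      else s) sieve
  let primes : List Int :=
    (PySem.List.pyRange 3 (num_slots + 1) 1).foldl (fun acc p =>
      if PySem.List.pyGetD sieve p false then acc ++ [p] else acc) []
  let result : PySem.Dict Int Int :=
    (primes.zip (PySem.List.slice primes (some 1) none ++ [num_slots])).foldl
      (fun d pq => d.insert pq.1 (pq.2 - pq.1)) PySem.Dict.empty
  (result.insert 1 2).items

-- ===== PRECONDITION & SPEC =====
def Spec_slot_alloc (num_slots : Int) (out : List (Int × Int)) : Prop := out = slot_alloc_alt num_slots
instance (num_slots : Int) (out : List (Int × Int)) : Decidable (Spec_slot_alloc num_slots out) := by unfold Spec_slot_alloc; infer_instance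

-- ===== CLAIM (what is proved, stated in full; the proofs are below) =====
def Claim_equal_slot_alloc : Prop := ∀ (num_slots : Int), Dom_slot_alloc num_slots → Spec_slot_alloc num_slots (slot_alloc num_slots)

-- ===== LEMMAS AND PROOFS =====

-- Proof-only names for the intermediate values of the two ports (definitionally the ports' `let`s)
def primesListA (n : Int) : List Int :=
  (PySem.List.pyRange 3 (n + 1) 1).foldl (fun acc number =>
    let count : Int :=
      (PySem.List.pyRange 2 number 1).foldl (fun c dv =>
        if PySem.Int.mod number dv = 0 then c + 1 else c) 0
    if count < 1 then acc ++ [number] else acc) []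

def sieveAt (n b : Int) : List Bool :=
  (PySem.List.pyRange 2 b 1).foldl (fun s p =>
    if PySem.List.pyGetD s p false then
      (PySem.List.pyRange (2 * p) (n + 1) p).foldl (fun s m => s.set m.toNat false) s
    else s) (List.replicate (n + 1).toNat true)

def primesListB (n : Int) : List Int :=
  (PySem.List.pyRange 3 (n + 1) 1).foldl (fun acc p =>
    if PySem.List.pyGetD (sieveAt n (n + 1)) p false then acc ++ [p] else acc) []

-- A's second loop body, over the fixed full prime list P
def bodyA (n : Int) (P : List Int) (d : PySem.Dict Int Int) (p : Int × Int) : PySem.Dict Int Int :=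
  if p.1 < (P.length : Int) - 1 then
    d.insert p.2 (PySem.List.pyGetD P (p.1 + 1) 0 - PySem.List.pyGetD P p.1 0)
  else if p.1 = (P.length : Int) - 1 then
    d.insert p.2 (n - PySem.List.pyGetD P p.1 0)
  else d

lemma slot_allocA_eq (n : Int) :
    slot_alloc n = (((PySem.List.enumerate (primesListA n)).foldl (bodyA n (primesListA n))
      PySem.Dict.empty).insert 1 2).items := rfl

lemma slot_allocB_eq (n : Int) :
    slot_alloc_alt n = ((((primesListB n).zip (PySem.List.slice (primesListB n) (some 1) none ++ [n])).foldl
      (fun d pq => d.insert pq.1 (pq.2 - pq.1)) PySem.Dict.empty).insert 1 2).items := rfl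

-- the marking loop sets exactly the listed (nonnegative) indices to false
lemma getD_setFalse_foldl (idxs : List Int) (hpos : ∀ m ∈ idxs, 0 ≤ m) :
    ∀ (s : List Bool) (j : Nat),
      (idxs.foldl (fun s m => s.set m.toNat false) s).getD j false
        = if (j : Int) ∈ idxs then false else s.getD j false := by
  induction idxs with
  | nil => simp
  | cons m idxs ih =>
    intro s j
    have hm : 0 ≤ m := hpos m (List.mem_cons_self ..)
    rw [List.foldl_cons, ih (fun x hx => hpos x (List.mem_cons_of_mem _ hx))]
    by_cases hj : (j : Int) ∈ idxs
    · simp [hj]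
    · by_cases hjm : (j : Int) = m
      · have hset : (s.set m.toNat false).getD j false = false := by
          rw [List.getD_eq_getElem?_getD, List.getElem?_set, if_pos (by omega : m.toNat = j)]
          split <;> simp
        rw [if_pos (List.mem_cons.mpr (Or.inl hjm)), if_neg hj]; exact hset
      · have hne : m.toNat ≠ j := by omega
        simp [List.mem_cons, hjm, hj, List.getD_eq_getElem?_getD, hne]

-- A's divisor-counting loop, as a countP
lemma count_fold_eq (m : Int) (l : List Int) : ∀ c : Int,
    l.foldl (fun c dv => if PySem.Int.mod m dv = 0 then c + 1 else c) c
      = c + (l.countP (fun dv => decide (PySem.Int.mod m dv = 0)) : Int) := by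
  induction l with
  | nil => simp
  | cons dv l ih =>
    intro c
    rw [List.foldl_cons]
    by_cases h : PySem.Int.mod m dv = 0
    · rw [if_pos h, ih, List.countP_cons, if_pos (by simpa using h)]; push_cast; ring
    · rw [if_neg h, ih, List.countP_cons, if_neg (by simpa using h)]; push_cast; ring

-- membership in the stepped marking range = proper multiple of b, at most n
lemma mem_markRange (n b : Int) (hb : 2 ≤ b) (j : Int) :
    j ∈ PySem.List.pyRange (2 * b) (n + 1) b ↔ (b ∣ j ∧ b < j ∧ j ≤ n) := by
  rw [PySem.List.mem_pyRange_iff_of_pos (by omega)]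
  constructor
  · rintro ⟨h1, h2, c, hc⟩
    have hdvd : b ∣ j := ⟨c + 2, by linarith⟩
    exact ⟨hdvd, by omega, by omega⟩
  · rintro ⟨⟨c, hc⟩, h2, h3⟩
    have hc2 : 2 ≤ c := by nlinarith
    exact ⟨by nlinarith, by omega, ⟨c - 2, by linarith [hc]⟩⟩

-- the sieve invariant: after the passes p = 2 .. b-1, entry j is true iff j has no proper divisor < b
lemma sieve_inv (n : Int) : ∀ b : Int, 2 ≤ b → b ≤ n + 1 →
    ∀ j : Nat, (j : Int) ≤ n →
      ((sieveAt n b).getD j false = true ↔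
        ¬ ∃ d : Int, 2 ≤ d ∧ d < b ∧ d < (j : Int) ∧ d ∣ (j : Int)) := by
  intro b hb
  induction b, hb using Int.le_induction with
  | base =>
    intro _ j hj
    rw [show sieveAt n 2 = List.replicate (n + 1).toNat true by
      simp [sieveAt, PySem.List.pyRange_one_eq_nil (le_refl (2:Int))]]
    have hlen : j < (n + 1).toNat := by omega
    rw [List.getD_eq_getElem?_getD, List.getElem?_replicate, if_pos hlen]
    simp only [Option.getD_some, true_iff]
    rintro ⟨d, h2, h3, -, -⟩; omega
  | succ b hb ih =>
    intro hbn j hj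
    have hstep : sieveAt n (b + 1)
        = (fun s p =>
            if PySem.List.pyGetD s p false then
              (PySem.List.pyRange (2 * p) (n + 1) p).foldl (fun s m => s.set m.toNat false) s
            else s) (sieveAt n b) b := by
      simp only [sieveAt, PySem.List.pyRange_one_succ_right (by omega : (2:Int) ≤ b),
        List.foldl_append, List.foldl_cons, List.foldl_nil]
    have ihb := ih (by omega)
    have hread : PySem.List.pyGetD (sieveAt n b) b false = (sieveAt n b).getD b.toNat false :=
      PySem.List.pyGetD_of_nonneg _ _ (by omega)
    have hcast : ((b.toNat : Int)) = b := by omega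
    rw [hstep]
    by_cases hsb : (sieveAt n b).getD b.toNat false = true
    · -- sieve[b] is still true: mark the proper multiples of b
      simp only [hread, hsb, if_true]
      rw [getD_setFalse_foldl _ (fun m hm => by
        have := (mem_markRange n b (by omega) m).mp hm
        omega) (sieveAt n b) j]
      by_cases hmem : (j : Int) ∈ PySem.List.pyRange (2 * b) (n + 1) b
      · have hj' := (mem_markRange n b (by omega) _).mp hmem
        rw [if_pos hmem]
        constructor
        · intro h; simp at h
        · intro hno; exact absurd ⟨b, by omega, by omega, by omega, hj'.1⟩ hno
      · rw [if_neg hmem, ihb j hj]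
        have hnd : ¬ (b ∣ (j:Int) ∧ b < (j:Int)) := by
          intro ⟨h1, h2⟩
          exact hmem ((mem_markRange n b (by omega) _).mpr ⟨h1, h2, hj⟩)
        constructor
        · rintro hno ⟨d, h2, h3, h4, h5⟩
          rcases eq_or_lt_of_le (by omega : d ≤ b) with rfl | hlt
          · exact hnd ⟨h5, h4⟩
          · exact hno ⟨d, h2, hlt, h4, h5⟩
        · rintro hno ⟨d, h2, h3, h4, h5⟩
          exact hno ⟨d, h2, by omega, h4, h5⟩
    · -- sieve[b] already false: b has a proper divisor e < b, so skipping b loses nothing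
      have hsb' : (sieveAt n b).getD b.toNat false = false := by
        cases h : (sieveAt n b).getD b.toNat false
        · rfl
        · exact absurd h hsb
      simp only [hread, hsb', Bool.false_eq_true, if_false]
      obtain ⟨e, he2, heb, -, hedvd⟩ : ∃ d : Int, 2 ≤ d ∧ d < b ∧ d < b ∧ d ∣ b := by
        by_contra hno
        have := (ihb b.toNat (by omega)).mpr (by rwa [hcast])
        rw [this] at hsb'
        exact absurd hsb' (by simp)
      rw [ihb j hj]
      constructor
      · rintro hno ⟨d, h2, h3, h4, h5⟩
        rcases eq_or_lt_of_le (by omega : d ≤ b) with rfl | hlt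
        · exact hno ⟨e, he2, heb, by omega, hedvd.trans h5⟩
        · exact hno ⟨d, h2, hlt, h4, h5⟩
      · rintro hno ⟨d, h2, h3, h4, h5⟩
        exact hno ⟨d, h2, by omega, h4, h5⟩

-- trial division and the finished sieve select the same numbers
lemma primes_eq (n : Int) : primesListA n = primesListB n := by
  rw [show primesListA n = (PySem.List.pyRange 3 (n + 1) 1).foldl (fun acc number =>
      if ((PySem.List.pyRange 2 number 1).foldl (fun c dv =>
          if PySem.Int.mod number dv = 0 then c + 1 else c) (0 : Int)) < 1
      then acc ++ [number] else acc) [] by rfl,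
    primesListB,
    PySem.List.foldl_append_ite_eq_filter
      (fun number => ((PySem.List.pyRange 2 number 1).foldl (fun c dv =>
        if PySem.Int.mod number dv = 0 then c + 1 else c) (0 : Int)) < 1),
    PySem.List.foldl_append_if_eq_filter]
  simp only [List.nil_append]
  apply List.filter_congr
  intro m hm
  have hm' := PySem.List.mem_pyRange_one.mp hm
  have hcount : ((PySem.List.pyRange 2 m 1).foldl (fun c dv =>
      if PySem.Int.mod m dv = 0 then c + 1 else c) (0 : Int) < 1)
      ↔ ¬ ∃ d : Int, 2 ≤ d ∧ d < m ∧ d ∣ m := by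
    rw [count_fold_eq]
    constructor
    · intro hlt ⟨d, h2, h3, h5⟩
      have hz : (PySem.List.pyRange 2 m 1).countP
          (fun dv => decide (PySem.Int.mod m dv = 0)) = 0 := by omega
      have := List.countP_eq_zero.mp hz d (PySem.List.mem_pyRange_one.mpr ⟨h2, h3⟩)
      simp [PySem.Int.mod_eq_zero_iff_dvd] at this
      exact this h5
    · intro hno
      have hz : (PySem.List.pyRange 2 m 1).countP
          (fun dv => decide (PySem.Int.mod m dv = 0)) = 0 := by
        rw [List.countP_eq_zero]
        intro d hd
        have hd' := PySem.List.mem_pyRange_one.mp hd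
        simp only [decide_eq_true_eq, PySem.Int.mod_eq_zero_iff_dvd]
        exact fun hdvd => hno ⟨d, hd'.1, hd'.2, hdvd⟩
      omega
  have hsieve : (PySem.List.pyGetD (sieveAt n (n + 1)) m false = true)
      ↔ ¬ ∃ d : Int, 2 ≤ d ∧ d < m ∧ d ∣ m := by
    rw [PySem.List.pyGetD_of_nonneg _ _ (by omega : (0:Int) ≤ m)]
    have hcast : ((m.toNat : Int)) = m := by omega
    rw [sieve_inv n (n + 1) (by omega) le_rfl m.toNat (by omega)]
    rw [hcast]
    constructor
    · intro hno ⟨d, h2, h3, h5⟩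
      exact hno ⟨d, h2, by omega, h3, h5⟩
    · intro hno ⟨d, h2, _, h4, h5⟩
      exact hno ⟨d, h2, h4, h5⟩
  rw [← hsieve] at hcount
  cases hb : PySem.List.pyGetD (sieveAt n (n + 1)) m false
  · have hnot : ¬ ((PySem.List.pyRange 2 m 1).foldl (fun c dv =>
        if PySem.Int.mod m dv = 0 then c + 1 else c) (0 : Int) < 1) :=
      fun h => by simpa [hb] using hcount.mp h
    simp [hnot]
  · simp [hcount.mpr hb]

-- the enumerate/guard loop of A and the zip loop of B insert the same key-value sequence
lemma gaps_eq (n : Int) (P : List Int) : ∀ (xs : List Int) (i : Nat), xs = P.drop i →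
    ∀ d : PySem.Dict Int Int,
      (PySem.List.enumerate xs (i : Int)).foldl (bodyA n P) d
        = (xs.zip (xs.drop 1 ++ [n])).foldl (fun d pq => d.insert pq.1 (pq.2 - pq.1)) d := by
  intro xs
  induction xs with
  | nil => intro i _ d; simp [PySem.List.enumerate_nil]
  | cons x xs ih =>
    intro i h d
    have hlen : xs.length + 1 = P.length - i := by
      have := congrArg List.length h
      simp at this
      omega
    have hi : i < P.length := by omega
    have hPi : PySem.List.pyGetD P (i : Int) 0 = x := by
      rw [PySem.List.pyGetD_natCast, List.getD_eq_getElem?_getD,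
        show P[i]? = some x by
          rw [show i = i + 0 by omega, ← List.getElem?_drop, ← h]; rfl]
      rfl
    rw [PySem.List.enumerate_cons, List.foldl_cons]
    cases xs with
    | nil =>
      have hlen' : P.length = i + 1 := by
        simp only [List.length_nil, Nat.zero_add] at hlen
        omega
      have hil : (i : Int) = (P.length : Int) - 1 := by omega
      have hbody : bodyA n P d ((i : Int), x) = d.insert x (n - x) := by
        rw [bodyA, if_neg (by omega : ¬ ((i : Int) < (P.length : Int) - 1)), if_pos hil, hPi]
      simp [PySem.List.enumerate_nil, hbody]
    | cons y rest =>
      have hi1 : i + 1 < P.length := by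
        simp only [List.length_cons] at hlen
        omega
      have hdrop : y :: rest = P.drop (i + 1) := by
        have : P.drop (i + 1) = (P.drop i).drop 1 := by rw [List.drop_drop, Nat.add_comm]
        rw [this, ← h]; rfl
      have hPi1 : PySem.List.pyGetD P ((i : Int) + 1) 0 = y := by
        rw [show ((i : Int) + 1) = ((i + 1 : Nat) : Int) by omega,
          PySem.List.pyGetD_natCast, List.getD_eq_getElem?_getD,
          show P[i+1]? = some y by
            rw [show i + 1 = (i + 1) + 0 by omega, ← List.getElem?_drop, ← hdrop]; rfl]
        rfl
      have hbody : bodyA n P d ((i : Int), x) = d.insert x (y - x) := by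
        rw [bodyA, if_pos (by omega : ((i : Int) < (P.length : Int) - 1)), hPi, hPi1]
      rw [hbody, show ((i : Int) + 1) = ((i + 1 : Nat) : Int) by omega,
        ih (i + 1) hdrop]
      simp

-- ===== VERDICT (by name: the statement is the Claim_ definition above) =====
theorem slot_alloc_spec : Claim_equal_slot_alloc := by
  intro n _
  show slot_alloc n = slot_alloc_alt n
  rw [slot_allocA_eq, slot_allocB_eq, primes_eq,
    PySem.List.slice_from _ (by norm_num : (0:Int) ≤ 1)]
  have := gaps_eq n (primesListB n) (primesListB n) 0 (by simp) PySem.Dict.empty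
  simp only [Nat.cast_zero] at this
  rw [this]
  norm_num
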